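-- pv_equiv track=rewrite | github.com/ESDAUNG/PhiSN | preprocessor.py | susPattern_decomposer
-- ===== SOURCE A (Python) =====
-- def susPattern_decomposer(url:str):
--     pre='None'
--     url_word=[]
--     url_word_digit=''
--     url_word_letter=''
--     url_word_symbol=''
--
--     for i in url:
--         if i.isalpha():
--             if pre=='digit':
--                 url_word.append(url_word_digit)
--                 url_word_digit=''
--             if pre=='symbol':
--                 url_word.append(url_word_symbol)
--                 url_word_symbol=''
--             url_word_letter=url_word_letter+i
--             pre='letter'
--
--         if i.isnumeric():
--             if pre=='letter':
--                 url_word.append(url_word_letter)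
--                 url_word_letter=''
--             if pre=='symbol':
--                 url_word.append(url_word_symbol)
--                 url_word_symbol=''
--             url_word_digit=url_word_digit+i
--             pre='digit'
--
--         if not i.isalnum():
--             if pre=='letter':
--                 url_word.append(url_word_letter)
--                 url_word_letter=''
--             if pre=='digit':
--                 url_word.append(url_word_digit)
--                 url_word_digit=''
--             url_word_symbol=url_word_symbol+i
--             pre='symbol'
--     if pre=='letter':
--         url_word.append(url_word_letter)
--     elif pre=='digit':
--         url_word.append(url_word_digit)
--     else:
--         url_word.append(url_word_symbol)
--
--     return url_word
-- ===== SOURCE B (Python) =====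
-- def susPattern_decomposer(url: str):
--     # Two-pointer run scanner: find each maximal run of same-class chars and slice it out.
--     def classify(c):
--         if c.isalpha():
--             return 'letter'
--         if c.isnumeric():
--             return 'digit'
--         return 'symbol'
--     if not url:
--         return ['']
--     out = []
--     i, n = 0, len(url)
--     while i < n:
--         j = i + 1
--         k = classify(url[i])
--         while j < n and classify(url[j]) == k:
--             j += 1
--         out.append(url[i:j])
--         i = j
--     return out
-- ===== Notes on version B (the rewrite author's own statement) =====
-- stated objective: simpler
-- what changed: Replaced A's four-variable state machine (pre-class tag plus three per-class string accumulators flushed on class changes) with a two-pointer scanner that slices out each maximal run of same-class characters, with an explicit [''] result for the empty string.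
import Mathlib
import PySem

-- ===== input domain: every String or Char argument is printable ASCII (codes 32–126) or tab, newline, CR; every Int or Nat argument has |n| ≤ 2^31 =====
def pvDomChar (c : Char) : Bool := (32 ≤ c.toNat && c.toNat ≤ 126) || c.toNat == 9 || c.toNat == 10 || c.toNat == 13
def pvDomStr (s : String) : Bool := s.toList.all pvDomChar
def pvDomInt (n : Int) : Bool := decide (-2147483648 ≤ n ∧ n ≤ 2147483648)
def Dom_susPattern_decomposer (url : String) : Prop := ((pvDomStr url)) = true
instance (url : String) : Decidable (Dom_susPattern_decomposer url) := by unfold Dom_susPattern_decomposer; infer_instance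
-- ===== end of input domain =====

-- B replaces A's four-variable state machine with a two-pointer maximal-run scanner (simpler, same O(n) cost).
-- Python's isnumeric/isalnum are ported with PySem.Chars.isdigit/isalnum, exact on the ASCII domain Dom.

-- ===== PORT A =====
-- one loop iteration of A: the three sequential ifs, mutating (pre, url_word, digit, letter, symbol)
def susPatternStepA (st : String × List String × String × String × String) (i : Char) :
    String × List String × String × String × String :=
  let (pre, ws, d, l, s) := st
  let (pre, ws, d, l, s) :=
    if PySem.Chars.isalpha i then
      let (ws, d) := if pre == "digit" then (ws ++ [d], "") else (ws, d)
      let (ws, s) := if pre == "symbol" then (ws ++ [s], "") else (ws, s)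
      (("letter" : String), ws, d, l.push i, s)
    else (pre, ws, d, l, s)
  let (pre, ws, d, l, s) :=
    if PySem.Chars.isdigit i then
      let (ws, l) := if pre == "letter" then (ws ++ [l], "") else (ws, l)
      let (ws, s) := if pre == "symbol" then (ws ++ [s], "") else (ws, s)
      (("digit" : String), ws, d.push i, l, s)
    else (pre, ws, d, l, s)
  if !(PySem.Chars.isalnum i) then
    let (ws, l) := if pre == "letter" then (ws ++ [l], "") else (ws, l)
    let (ws, d) := if pre == "digit" then (ws ++ [d], "") else (ws, d)
    (("symbol" : String), ws, d, l, s.push i)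
  else (pre, ws, d, l, s)

-- A's trailing flush of the pending accumulator
def susPatternFinA (st : String × List String × String × String × String) : List String :=
  let (pre, ws, d, l, s) := st
  if pre == "letter" then ws ++ [l]
  else if pre == "digit" then ws ++ [d]
  else ws ++ [s]

def susPattern_decomposer (url : String) : List String :=
  susPatternFinA (url.toList.foldl susPatternStepA ("None", [], "", "", ""))

-- ===== PORT B =====
def susPatternClassify (c : Char) : String :=
  if PySem.Chars.isalpha c then "letter"
  else if PySem.Chars.isdigit c then "digit"
  else "symbol"

-- the two-pointer run scanner of Source B: peel one maximal run, recurse on the rest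
def susPatternRuns : List Char → List String
  | [] => []
  | c :: rest =>
    String.mk (c :: rest.takeWhile (fun x => susPatternClassify x == susPatternClassify c)) ::
      susPatternRuns (rest.dropWhile (fun x => susPatternClassify x == susPatternClassify c))
termination_by l => l.length
decreasing_by
  simpa [Nat.lt_succ_iff] using List.length_dropWhile_le
    (p := fun x => susPatternClassify x == susPatternClassify c) (l := rest)

def susPattern_decomposer_alt (url : String) : List String :=
  if url.toList = [] then [""] else susPatternRuns url.toList

-- ===== PRECONDITION & SPEC =====
def Spec_susPattern_decomposer (url : String) (out : List String) : Prop := out = susPattern_decomposer_alt url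
instance (url : String) (out : List String) : Decidable (Spec_susPattern_decomposer url out) := by unfold Spec_susPattern_decomposer; infer_instance

-- ===== CLAIM (what is proved, stated in full; the proofs are below) =====
def Claim_equal_susPattern_decomposer : Prop := ∀ (url : String), Dom_susPattern_decomposer url → Spec_susPattern_decomposer url (susPattern_decomposer url)

-- ===== LEMMAS AND PROOFS =====

-- numeric character class: 0 = letter, 1 = digit, 2 = symbol
def susPatternC (c : Char) : Nat :=
  if PySem.Chars.isalpha c then 0 else if PySem.Chars.isdigit c then 1 else 2

def susPatternName : Nat → String := fun k =>
  if k = 0 then "letter" else if k = 1 then "digit" else "symbol"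

-- A's three accumulators (d, l, s) when the pending run of class k has content t
def susPatternSlots : Nat → String → String × String × String := fun k t =>
  if k = 0 then ("", t, "") else if k = 1 then (t, "", "") else ("", "", t)

-- the common grouping recursion both sides are reduced to
def susPatternM : List Char → Nat → List Char → List (List Char)
  | t, _, [] => [t]
  | t, k, c :: cs =>
    if susPatternC c = k then susPatternM (t ++ [c]) k cs
    else t :: susPatternM [c] (susPatternC c) cs

theorem susPattern_not_alpha_digit (c : Char) :
    (PySem.Chars.isalpha c && PySem.Chars.isdigit c) = false := by
  unfold PySem.Chars.isalpha PySem.Chars.isdigit PySem.Chars.isupper PySem.Chars.islower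
  simp only [Bool.and_eq_false_iff, Bool.or_eq_false_iff, decide_eq_false_iff_not,
    Char.le_def, UInt32.le_iff_toNat_le]
  have h0 : ('0'.val.toNat) = 48 := rfl
  have h9 : ('9'.val.toNat) = 57 := rfl
  have hA : ('A'.val.toNat) = 65 := rfl
  have hZ : ('Z'.val.toNat) = 90 := rfl
  have ha : ('a'.val.toNat) = 97 := rfl
  have hz : ('z'.val.toNat) = 122 := rfl
  omega

theorem susPattern_alnum_eq (c : Char) :
    PySem.Chars.isalnum c = (PySem.Chars.isalpha c || PySem.Chars.isdigit c) := by
  unfold PySem.Chars.isalnum PySem.Chars.isalpha PySem.Chars.isdigit; rfl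

theorem susPatternC_lt (c : Char) : susPatternC c < 3 := by
  unfold susPatternC; split_ifs <;> omega

theorem susPattern_classify_eq (c : Char) : susPatternClassify c = susPatternName (susPatternC c) := by
  unfold susPatternClassify susPatternC susPatternName; split_ifs <;> simp_all

theorem susPatternC_cases (c : Char) : susPatternC c = 0 ∨ susPatternC c = 1 ∨ susPatternC c = 2 := by
  have := susPatternC_lt c; omega

theorem susPattern_beq_classify (x c : Char) :
    (susPatternClassify x == susPatternClassify c) = (susPatternC x == susPatternC c) := by
  rw [susPattern_classify_eq, susPattern_classify_eq]
  rcases susPatternC_cases x with hx | hx | hx <;> rcases susPatternC_cases c with hc | hc | hc <;>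
    rw [hx, hc] <;> decide

-- characterisation of the class tests by susPatternC
theorem susPattern_alpha_iff (c : Char) : PySem.Chars.isalpha c = (susPatternC c == 0) := by
  unfold susPatternC
  have := susPattern_not_alpha_digit c
  cases ha : PySem.Chars.isalpha c <;> simp [ha] <;> split_ifs <;> simp_all

theorem susPattern_digit_iff (c : Char) : PySem.Chars.isdigit c = (susPatternC c == 1) := by
  unfold susPatternC
  have := susPattern_not_alpha_digit c
  cases ha : PySem.Chars.isalpha c <;> cases hd : PySem.Chars.isdigit c <;> simp_all

-- one step of A from a clean class-k state behaves like one step of susPatternM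
theorem susPattern_stepA_eq (k : Nat) (hk : k < 3) (ws : List String) (t : String) (c : Char) :
    susPatternStepA (susPatternName k, ws, susPatternSlots k t) c =
      (if susPatternC c = k
       then (susPatternName k, ws, susPatternSlots k (t.push c))
       else (susPatternName (susPatternC c), ws ++ [t], susPatternSlots (susPatternC c) ("".push c))) := by
  have halnum := susPattern_alnum_eq c
  have halpha := susPattern_alpha_iff c
  have hdigit := susPattern_digit_iff c
  interval_cases k <;>
    rcases susPatternC_cases c with hc | hc | hc <;>
      simp_all [susPatternStepA, susPatternName, susPatternSlots]

-- A's first step from the initial 'None' state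
theorem susPattern_stepA_none (c : Char) :
    susPatternStepA ("None", [], "", "", "") c =
      (susPatternName (susPatternC c), [], susPatternSlots (susPatternC c) ("".push c)) := by
  have halnum := susPattern_alnum_eq c
  have halpha := susPattern_alpha_iff c
  have hdigit := susPattern_digit_iff c
  rcases susPatternC_cases c with hc | hc | hc <;>
    simp_all [susPatternStepA, susPatternName, susPatternSlots]

theorem susPattern_finA_eq (k : Nat) (hk : k < 3) (ws : List String) (t : String) :
    susPatternFinA (susPatternName k, ws, susPatternSlots k t) = ws ++ [t] := by
  interval_cases k <;> simp [susPatternFinA, susPatternName, susPatternSlots]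

-- A's loop from a clean class-k state computes susPatternM
theorem susPattern_loopA (cs : List Char) : ∀ (k : Nat), k < 3 → ∀ (ws : List String) (t : String),
    susPatternFinA (cs.foldl susPatternStepA (susPatternName k, ws, susPatternSlots k t)) =
      ws ++ (susPatternM t.toList k cs).map String.mk := by
  induction cs with
  | nil =>
    intro k hk ws t
    simp [susPattern_finA_eq k hk, susPatternM, String.mk]
  | cons c cs ih =>
    intro k hk ws t
    rw [List.foldl_cons, susPattern_stepA_eq k hk ws t c]
    by_cases h : susPatternC c = k
    · rw [if_pos h]
      rw [ih k hk ws (t.push c)]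
      simp [susPatternM, h, String.toList_push]
    · rw [if_neg h]
      rw [ih (susPatternC c) (susPatternC_lt c) (ws ++ [t]) ("".push c)]
      simp [susPatternM, h, String.toList_push, List.append_assoc, String.mk]

-- B's scanner from a pending partial run t of class k computes susPatternM
theorem susPattern_runsB (cs : List Char) : ∀ (k : Nat) (t : List Char),
    (String.mk (t ++ cs.takeWhile (fun x => susPatternC x == k)) ::
        susPatternRuns (cs.dropWhile (fun x => susPatternC x == k))) =
      (susPatternM t k cs).map String.mk := by
  induction cs with
  | nil => intro k t; simp [susPatternRuns, susPatternM]
  | cons c cs ih =>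
    intro k t
    by_cases h : susPatternC c = k
    · simp only [List.takeWhile_cons, List.dropWhile_cons, h, beq_self_eq_true, if_true]
      rw [show t ++ c :: List.takeWhile (fun x => susPatternC x == k) cs =
            (t ++ [c]) ++ List.takeWhile (fun x => susPatternC x == k) cs by simp]
      rw [ih k (t ++ [c])]
      simp [susPatternM, h]
    · have hbe : (susPatternC c == k) = false := by simp [h]
      simp only [List.takeWhile_cons, List.dropWhile_cons, hbe, Bool.false_eq_true, if_false]
      rw [List.append_nil]
      have hgo : susPatternRuns (c :: cs) = (susPatternM [c] (susPatternC c) cs).map String.mk := by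
        rw [susPatternRuns]
        simp only [susPattern_beq_classify]
        exact ih (susPatternC c) [c]
      rw [hgo]
      simp [susPatternM, h]

-- ===== VERDICT (by name: the statement is the Claim_ definition above) =====
theorem susPattern_decomposer_spec : Claim_equal_susPattern_decomposer := by
  intro url _
  unfold Spec_susPattern_decomposer susPattern_decomposer susPattern_decomposer_alt
  cases hcs : url.toList with
  | nil => simp [susPatternFinA]
  | cons c cs =>
    rw [List.foldl_cons, susPattern_stepA_none,
      susPattern_loopA cs (susPatternC c) (susPatternC_lt c) [] ("".push c),
      if_neg (List.cons_ne_nil c cs), susPatternRuns]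
    simp only [susPattern_beq_classify]
    have h := susPattern_runsB cs (susPatternC c) [c]
    simp only [List.singleton_append] at h
    rw [h]
    simp [String.toList_push]
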